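-- pv_equiv track=rewrite | github.com/DongYun666/leetcode | 2022 年度杭州未来科技城数字经济人才编程大赛/第三题.py | buildTransferStation
-- ===== SOURCE A (Python) =====
-- from typing import List
--
-- def buildTransferStation(area: List[List[int]]) -> int:
--     x,y = [],[]
--     for i in range(len(area)):
--         for j in range(len(area[0])):
--             if area[i][j] == 1:
--                 x.append(i)
--                 y.append(j)
--     x.sort()
--     y.sort()
--     ans = 0
--     for i in range(len(x)):
--         ans +=abs(x[i]-x[len(x)//2])+abs(y[i]-y[len(y)//2])
--     return ans
-- ===== SOURCE B (Python) =====
-- def _pair_total(s):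
--     # two-pointer pairing: sum of (max-min) over outer pairs of the sorted list
--     n = len(s)
--     t = 0
--     for k in range(n // 2):
--         t += s[n - 1 - k] - s[k]
--     return t
--
-- def buildTransferStation(area):
--     w = len(area[0])  # grid width is taken from the first row
--     xs, ys = [], []
--     for i, row in enumerate(area):
--         for j, v in enumerate(row[:w]):
--             if v == 1:
--                 xs.append(i)
--                 ys.append(j)
--     xs.sort()
--     ys.sort()
--     return _pair_total(xs) + _pair_total(ys)
-- ===== Notes on version B (the rewrite author's own statement) =====
-- stated objective: alternative
-- what changed: B drops A's per-element distance-to-median pass (which indexes the median cell x[len//2] for every element) and instead computes each axis total with a half-length outer-pairing pass summing sorted[n-1-k]-sorted[k], equal by the median-deviation identity; coordinates are collected with enumerate over row[:w] (w = len(area[0])) instead of index ranges. Pre_ excludes rows shorter than row 0 (A raises IndexError) and the empty grid, where A returns 0 only because len(area[0]) is never evaluated while B computes the width up front and raises.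
-- outside the precondition, e.g. on buildTransferStation([]): A returns 0, B raises IndexError
import Mathlib
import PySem

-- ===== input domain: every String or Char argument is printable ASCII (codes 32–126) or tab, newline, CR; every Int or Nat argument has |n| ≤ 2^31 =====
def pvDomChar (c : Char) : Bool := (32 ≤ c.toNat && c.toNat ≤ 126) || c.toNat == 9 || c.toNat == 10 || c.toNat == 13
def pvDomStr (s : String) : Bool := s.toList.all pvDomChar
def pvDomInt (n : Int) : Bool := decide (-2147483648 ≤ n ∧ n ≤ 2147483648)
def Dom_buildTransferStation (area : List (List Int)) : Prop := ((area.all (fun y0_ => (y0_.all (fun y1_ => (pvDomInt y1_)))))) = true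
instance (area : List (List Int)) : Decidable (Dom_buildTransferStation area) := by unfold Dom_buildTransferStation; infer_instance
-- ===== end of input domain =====

-- B replaces A's sum of distances to the median cell by a two-pointer pairing pass
-- (sum of sorted[n-1-k] - sorted[k] over the outer pairs) per axis — same totals by the
-- median-deviation identity; a genuinely different final accumulation, not faster.

-- ===== PORT A =====
def buildTransferStation (area : List (List Int)) : Int :=
  -- x,y = [],[]; nested for-loops appending i and j where area[i][j] == 1
  let xy : List Int × List Int :=
    (PySem.List.pyRange 0 area.length).foldl (fun xy i =>
      (PySem.List.pyRange 0 (area.headD []).length).foldl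
        (fun (xy : List Int × List Int) j =>
          if PySem.List.pyGetD (PySem.List.pyGetD area i []) j 0 = 1
            then (xy.1 ++ [i], xy.2 ++ [j]) else xy) xy) ([], [])
  -- x.sort(); y.sort()
  let x := PySem.List.sorted xy.1 (fun v => v)
  let y := PySem.List.sorted xy.2 (fun v => v)
  -- ans loop: abs distances to x[len(x)//2] and y[len(y)//2]
  (PySem.List.pyRange 0 x.length).foldl (fun ans i =>
    ans + |PySem.List.pyGetD x i 0 -
             PySem.List.pyGetD x (PySem.Int.floordiv x.length 2) 0|
        + |PySem.List.pyGetD y i 0 -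
             PySem.List.pyGetD y (PySem.Int.floordiv y.length 2) 0|) 0

-- ===== PORT B =====
-- helper _pair_total: for k in range(n//2): t += s[n-1-k] - s[k]
def pvPairTotal (s : List Int) : Int :=
  (PySem.List.pyRange 0 (PySem.Int.floordiv s.length 2)).foldl
    (fun t k => t + (PySem.List.pyGetD s ((s.length : Int) - 1 - k) 0 -
                     PySem.List.pyGetD s k 0)) 0

def buildTransferStation_alt (area : List (List Int)) : Int :=
  -- w = len(area[0]) is the grid width; collect coordinates with enumerate over row[:w],
  -- sort each axis, add the two pairing totals
  let xy : List Int × List Int :=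
    (PySem.List.enumerate area).foldl (fun (xy : List Int × List Int) ir =>
      (PySem.List.enumerate (PySem.List.slice ir.2 none
          (some ((area.headD []).length : Int)))).foldl (fun xy jv =>
        if jv.2 = 1 then (xy.1 ++ [ir.1], xy.2 ++ [jv.1]) else xy) xy) ([], [])
  pvPairTotal (PySem.List.sorted xy.1 (fun v => v)) +
    pvPairTotal (PySem.List.sorted xy.2 (fun v => v))

-- ===== PRECONDITION & SPEC =====
-- Pre_ excludes grids having a row shorter than row 0, where A raises IndexError, and the
-- empty grid, where A returns 0 only because its width expression len(area[0]) is never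
-- evaluated while B computes the width up front and raises there itself.
def Pre_buildTransferStation (area : List (List Int)) : Prop :=
  area ≠ [] ∧ ∀ row ∈ area, (area.headD []).length ≤ row.length
instance (area : List (List Int)) : Decidable (Pre_buildTransferStation area) := by
  unfold Pre_buildTransferStation; infer_instance
def pvWitness_buildTransferStation : List (List Int) := [[1, 0], [0, 1]]

def Spec_buildTransferStation (area : List (List Int)) (out : Int) : Prop :=
  out = buildTransferStation_alt area
instance (area : List (List Int)) (out : Int) : Decidable (Spec_buildTransferStation area out) := by
  unfold Spec_buildTransferStation; infer_instance

-- ===== CLAIM (what is proved, stated in full; the proofs are below) =====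
def Claim_equal_buildTransferStation : Prop :=
  ∀ (area : List (List Int)), Dom_buildTransferStation area →
    Pre_buildTransferStation area →
    Spec_buildTransferStation area (buildTransferStation area)

-- ===== LEMMAS AND PROOFS =====

-- list sum over List.range as a Finset sum
theorem pv_sum_map_range (n : Nat) (f : Nat → Int) :
    ((List.range n).map f).sum = ∑ i ∈ Finset.range n, f i := by
  induction n with
  | zero => simp
  | succ k ih => simp [List.range_succ, Finset.sum_range_succ, ih]

-- sorted lists are monotone in getD
theorem pv_sorted_mono (s : List Int) (hs : s.Pairwise (· ≤ ·))
    (i j : Nat) (hij : i ≤ j) (hj : j < s.length) :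
    s.getD i 0 ≤ s.getD j 0 := by
  rcases Nat.lt_or_ge i j with h | h
  · rw [List.getD_eq_getElem s 0 (by omega), List.getD_eq_getElem s 0 hj]
    exact List.pairwise_iff_getElem.mp hs i j (by omega) hj h
  · have : i = j := by omega
    subst this; rfl

-- the median-deviation / outer-pairing identity on a sorted list (Nat-index form)
theorem pv_median_pairing (s : List Int) (hs : s.Pairwise (· ≤ ·)) :
    ∑ i ∈ Finset.range s.length, |s.getD i 0 - s.getD (s.length / 2) 0|
      = ∑ k ∈ Finset.range (s.length / 2), (s.getD (s.length - 1 - k) 0 - s.getD k 0) := by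
  set n := s.length with hn
  set h := n / 2 with hh
  set g : Nat → Int := fun i => s.getD i 0 with hg
  rcases Nat.eq_zero_or_pos n with h0 | h0
  · simp [h0, hh]
  have hhn : h < n := Nat.div_lt_self h0 (by omega)
  have hsplit1 : ∑ i ∈ Finset.range n, |g i - g h|
      = ∑ i ∈ Finset.range h, |g i - g h| + ∑ i ∈ Finset.Ico h n, |g i - g h| := by
    rw [Finset.range_eq_Ico, ← Finset.sum_Ico_consecutive _ (Nat.zero_le h) (by omega),
      ← Finset.range_eq_Ico]
  have hlow : ∑ i ∈ Finset.range h, |g i - g h| = ∑ i ∈ Finset.range h, (g h - g i) := by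
    apply Finset.sum_congr rfl
    intro i hi
    have hi' : i < h := Finset.mem_range.mp hi
    have : g i ≤ g h := pv_sorted_mono s hs i h (by omega) hhn
    rw [abs_of_nonpos (by omega), neg_sub]
  have hmid : ∑ i ∈ Finset.Ico h n, |g i - g h|
      = ∑ i ∈ Finset.Ico (n - h) n, (g i - g h) := by
    rw [← Finset.sum_Ico_consecutive _ (show h ≤ n - h by omega) (show n - h ≤ n by omega)]
    have hz : ∑ i ∈ Finset.Ico h (n - h), |g i - g h| = 0 := by
      apply Finset.sum_eq_zero
      intro i hi
      have := Finset.mem_Ico.mp hi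
      have : i = h := by omega
      simp [this]
    rw [hz, zero_add]
    apply Finset.sum_congr rfl
    intro i hi
    have hi' := Finset.mem_Ico.mp hi
    have : g h ≤ g i := pv_sorted_mono s hs h i (by omega) hi'.2
    exact abs_of_nonneg (by omega)
  have hrefl : ∑ k ∈ Finset.range h, g (n - 1 - k) = ∑ i ∈ Finset.Ico (n - h) n, g i := by
    have h1 : ∑ k ∈ Finset.range h, g (n - 1 - k)
        = ∑ k ∈ Finset.range h, (fun j => g (n - h + j)) (h - 1 - k) := by
      apply Finset.sum_congr rfl
      intro k hk
      have hk' : k < h := Finset.mem_range.mp hk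
      have : n - h + (h - 1 - k) = n - 1 - k := by omega
      simp [this]
    rw [h1, Finset.sum_range_reflect (fun j => g (n - h + j)) h]
    rw [Finset.sum_Ico_eq_sum_range]
    have : n - (n - h) = h := by omega
    rw [this]
  have hrhs : ∑ k ∈ Finset.range h, (g (n - 1 - k) - g k)
      = ∑ i ∈ Finset.Ico (n - h) n, g i - ∑ k ∈ Finset.range h, g k := by
    rw [Finset.sum_sub_distrib, hrefl]
  rw [hsplit1, hlow, hmid, hrhs, Finset.sum_sub_distrib, Finset.sum_sub_distrib,
    Finset.sum_const, Finset.sum_const, Finset.card_range, Nat.card_Ico]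
  have : n - (n - h) = h := by omega
  rw [this]
  ring

-- A's collection loop equals B's collection loop on grids where every row reaches the width
theorem pv_collect_eq (area : List (List Int)) (hpre : Pre_buildTransferStation area) :
    (PySem.List.enumerate area).foldl (fun (xy : List Int × List Int) ir =>
      (PySem.List.enumerate (PySem.List.slice ir.2 none (some ((area.headD []).length : Int)))).foldl
        (fun xy jv =>
          if jv.2 = 1 then (xy.1 ++ [ir.1], xy.2 ++ [jv.1]) else xy) xy) ([], [])
    = (PySem.List.pyRange 0 area.length).foldl (fun xy i =>
      (PySem.List.pyRange 0 (area.headD []).length).foldl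
        (fun (xy : List Int × List Int) j =>
          if PySem.List.pyGetD (PySem.List.pyGetD area i []) j 0 = 1
            then (xy.1 ++ [i], xy.2 ++ [j]) else xy) xy) ([], []) := by
  rw [PySem.List.enumerate_eq_map_pyRange area [], List.foldl_map]
  apply PySem.List.foldl_congr_mem
  intro acc i hi
  have hi' := PySem.List.mem_pyRange_one.mp hi
  have hwle : (area.headD []).length ≤ (PySem.List.pyGetD area i []).length := by
    apply hpre.2
    rw [PySem.List.pyGetD_eq_getElem area [] hi'.1 (by simpa [PySem.List.len] using hi'.2)]
    exact List.getElem_mem _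
  rw [PySem.List.slice_to_natCast,
    PySem.List.enumerate_eq_map_pyRange ((PySem.List.pyGetD area i []).take (area.headD []).length) 0,
    List.foldl_map]
  have hlen : ((PySem.List.pyGetD area i []).take (area.headD []).length).length
      = (area.headD []).length := by
    rw [List.length_take]; omega
  simp only [PySem.List.len, hlen]
  apply PySem.List.foldl_congr_mem
  intro acc2 j hj
  have hj' := PySem.List.mem_pyRange_one.mp hj
  have hjw : j.toNat < (area.headD []).length := by omega
  have hget : PySem.List.pyGetD ((PySem.List.pyGetD area i []).take (area.headD []).length) j 0
      = PySem.List.pyGetD (PySem.List.pyGetD area i []) j 0 := by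
    rw [PySem.List.pyGetD_eq_getElem _ 0 hj'.1 (by rw [hlen]; omega),
      PySem.List.pyGetD_eq_getElem _ 0 hj'.1 (by omega)]
    exact List.getElem_take
  rw [hget]

-- the collected pair, in closed form (components split)
theorem pv_collect_split (area : List (List Int)) :
    (PySem.List.pyRange 0 area.length).foldl (fun xy i =>
      (PySem.List.pyRange 0 (area.headD []).length).foldl
        (fun (xy : List Int × List Int) j =>
          if PySem.List.pyGetD (PySem.List.pyGetD area i []) j 0 = 1
            then (xy.1 ++ [i], xy.2 ++ [j]) else xy) xy) ([], [])
    = ((PySem.List.pyRange 0 area.length).flatMap (fun i =>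
          ((PySem.List.pyRange 0 (area.headD []).length).filter
            (fun j => decide (PySem.List.pyGetD (PySem.List.pyGetD area i []) j 0 = 1))).map (fun _ => i)),
       (PySem.List.pyRange 0 area.length).flatMap (fun i =>
          ((PySem.List.pyRange 0 (area.headD []).length).filter
            (fun j => decide (PySem.List.pyGetD (PySem.List.pyGetD area i []) j 0 = 1))).map (fun j => j))) := by
  have h1 : ∀ (i : Int) (xy : List Int × List Int),
      (PySem.List.pyRange 0 (area.headD []).length).foldl
        (fun (xy : List Int × List Int) j =>
          if PySem.List.pyGetD (PySem.List.pyGetD area i []) j 0 = 1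
            then (xy.1 ++ [i], xy.2 ++ [j]) else xy) xy
      = (xy.1 ++ ((PySem.List.pyRange 0 (area.headD []).length).filter
            (fun j => decide (PySem.List.pyGetD (PySem.List.pyGetD area i []) j 0 = 1))).map (fun _ => i),
         xy.2 ++ ((PySem.List.pyRange 0 (area.headD []).length).filter
            (fun j => decide (PySem.List.pyGetD (PySem.List.pyGetD area i []) j 0 = 1))).map (fun j => j)) := by
    intro i ⟨a, b⟩
    have hfun : (fun (xy : List Int × List Int) j =>
            if PySem.List.pyGetD (PySem.List.pyGetD area i []) j 0 = 1
              then (xy.1 ++ [i], xy.2 ++ [j]) else xy)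
        = (fun (s : List Int × List Int) e =>
            ((fun acc e => if PySem.List.pyGetD (PySem.List.pyGetD area i []) e 0 = 1
                then acc ++ [i] else acc) s.1 e,
             (fun acc e => if PySem.List.pyGetD (PySem.List.pyGetD area i []) e 0 = 1
                then acc ++ [e] else acc) s.2 e)) := by
      funext xy j; by_cases h : PySem.List.pyGetD (PySem.List.pyGetD area i []) j 0 = 1 <;> simp [h]
    rw [hfun, PySem.List.foldl_prod_mk
        (f := fun acc e => if PySem.List.pyGetD (PySem.List.pyGetD area i []) e 0 = 1 then acc ++ [i] else acc)
        (g := fun acc e => if PySem.List.pyGetD (PySem.List.pyGetD area i []) e 0 = 1 then acc ++ [e] else acc),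
      PySem.List.foldl_append_ite (p := fun e => PySem.List.pyGetD (PySem.List.pyGetD area i []) e 0 = 1) (f := fun _ => i),
      PySem.List.foldl_append_ite (p := fun e => PySem.List.pyGetD (PySem.List.pyGetD area i []) e 0 = 1) (f := fun e => e)]
  rw [PySem.List.foldl_congr_mem _ _
      (fun (s : List Int × List Int) e =>
        ((fun acc i => acc ++ ((PySem.List.pyRange 0 (area.headD []).length).filter
            (fun j => decide (PySem.List.pyGetD (PySem.List.pyGetD area i []) j 0 = 1))).map (fun _ => i)) s.1 e,
         (fun acc i => acc ++ ((PySem.List.pyRange 0 (area.headD []).length).filter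
            (fun j => decide (PySem.List.pyGetD (PySem.List.pyGetD area i []) j 0 = 1))).map (fun j => j)) s.2 e))
      _ (fun acc i _ => h1 i acc),
    PySem.List.foldl_prod_mk
      (f := fun acc i => acc ++ ((PySem.List.pyRange 0 (area.headD []).length).filter
            (fun j => decide (PySem.List.pyGetD (PySem.List.pyGetD area i []) j 0 = 1))).map (fun _ => i))
      (g := fun acc i => acc ++ ((PySem.List.pyRange 0 (area.headD []).length).filter
            (fun j => decide (PySem.List.pyGetD (PySem.List.pyGetD area i []) j 0 = 1))).map (fun j => j)),
    PySem.List.foldl_append_eq_flatMap, PySem.List.foldl_append_eq_flatMap]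
  simp

-- per-axis: A's distance-to-median accumulation equals B's pvPairTotal, on a sorted list
theorem pv_axis_eq (s : List Int) (hs : s.Pairwise (· ≤ ·)) :
    ((PySem.List.pyRange 0 s.length).map (fun i =>
        |PySem.List.pyGetD s i 0 -
          PySem.List.pyGetD s (PySem.Int.floordiv s.length 2) 0|)).sum
      = pvPairTotal s := by
  have hfd : PySem.Int.floordiv (s.length : Int) 2 = ((s.length / 2 : Nat) : Int) := by
    exact_mod_cast PySem.Int.floordiv_natCast s.length 2
  rw [PySem.List.pyRange_zero_natCast, List.map_map]
  simp only [Function.comp_def, hfd, PySem.List.pyGetD_natCast]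
  rw [pv_sum_map_range]
  unfold pvPairTotal
  rw [PySem.List.foldl_add, hfd, PySem.List.pyRange_zero_natCast, List.map_map,
    pv_sum_map_range]
  have hR : ∑ k ∈ Finset.range (s.length / 2),
      ((fun k => PySem.List.pyGetD s ((s.length : Int) - 1 - k) 0 - PySem.List.pyGetD s k 0)
        ∘ (fun k : Nat => (k : Int))) k
      = ∑ k ∈ Finset.range (s.length / 2), (s.getD (s.length - 1 - k) 0 - s.getD k 0) := by
    apply Finset.sum_congr rfl
    intro k hk
    have hk' : k < s.length / 2 := Finset.mem_range.mp hk
    have hc : (s.length : Int) - 1 - (k : Int) = ((s.length - 1 - k : Nat) : Int) := by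
      have : k < s.length := by omega
      omega
    simp [Function.comp, hc, PySem.List.pyGetD_natCast]
  rw [hR, pv_median_pairing s hs]
  ring

-- ===== VERDICT (by name: the statement is the Claim_ definition above) =====
theorem buildTransferStation_spec : Claim_equal_buildTransferStation := by
  intro area _ hpre
  unfold Spec_buildTransferStation buildTransferStation buildTransferStation_alt
  rw [pv_collect_eq area hpre, pv_collect_split area]
  set xs := (PySem.List.pyRange 0 area.length).flatMap (fun i =>
      ((PySem.List.pyRange 0 (area.headD []).length).filter
        (fun j => decide (PySem.List.pyGetD (PySem.List.pyGetD area i []) j 0 = 1))).map (fun _ => i)) with hxs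
  set ys := (PySem.List.pyRange 0 area.length).flatMap (fun i =>
      ((PySem.List.pyRange 0 (area.headD []).length).filter
        (fun j => decide (PySem.List.pyGetD (PySem.List.pyGetD area i []) j 0 = 1))).map (fun j => j)) with hys
  have hlenxy : xs.length = ys.length := by
    rw [hxs, hys]; simp [List.length_flatMap]
  set x := PySem.List.sorted xs (fun v => v) with hx
  set y := PySem.List.sorted ys (fun v => v) with hy
  have hxy : x.length = y.length := by
    rw [hx, hy, PySem.List.length_sorted, PySem.List.length_sorted, hlenxy]
  have hxp : x.Pairwise (· ≤ ·) := PySem.List.sorted_pairwise xs (fun v => v)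
  have hyp : y.Pairwise (· ≤ ·) := PySem.List.sorted_pairwise ys (fun v => v)
  -- turn A's loop into a sum, split it, and apply the per-axis identity
  rw [PySem.List.foldl_congr_mem _ _
      (fun acc i => acc +
        (|PySem.List.pyGetD x i 0 - PySem.List.pyGetD x (PySem.Int.floordiv x.length 2) 0| +
         |PySem.List.pyGetD y i 0 - PySem.List.pyGetD y (PySem.Int.floordiv y.length 2) 0|))
      _ (by intro acc i _; ring),
    PySem.List.foldl_add, PySem.List.sum_map_add_int, zero_add,
    pv_axis_eq x hxp]
  have hybound : ((PySem.List.pyRange 0 x.length).map (fun i =>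
      |PySem.List.pyGetD y i 0 - PySem.List.pyGetD y (PySem.Int.floordiv y.length 2) 0|)).sum
      = pvPairTotal y := by
    rw [hxy]; exact pv_axis_eq y hyp
  rw [hybound]
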